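-- pv_equiv track=rewrite | github.com/Hetharsi/poker | poker_rules.py | best_colour_flush
-- ===== SOURCE A (Python) =====
-- def isColourFlush(hand):
--     is_colour_flush = False
--     hand = list(map (lambda x: x[0], hand))
--     myTuple = ()
--     setHand = sorted(list(set(hand)))
--     for i in setHand:
--         myTuple += ((i, hand.count(i)),)
--     for x in myTuple:
--         if x[1] > 4: is_colour_flush = True
--     return (is_colour_flush)
--
-- def best_colour_flush(hand):
--     bestColourFlush = ()
--     if isColourFlush(hand):
--         hand = list(map (lambda x: x[0], hand))
--         myTuple = ()
--         setHand = sorted(list(set(hand)))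
--         for i in setHand:
--             myTuple += ((i, hand.count(i)),)
--         for x in myTuple:
--             if x[1] > 4:
--                 bestColourFlush = x
--         return bestColourFlush
-- ===== SOURCE B (Python) =====
-- def best_colour_flush(hand):
--     colours = sorted(card[0] for card in hand)
--     best = None
--     i = 0
--     n = len(colours)
--     while i < n:
--         j = i + 1
--         while j < n and colours[j] == colours[i]:
--             j += 1
--         if j - i > 4:
--             best = (colours[i], j - i)
--         i = j
--     return best
-- ===== Notes on version B (the rewrite author's own statement) =====
-- stated objective: faster
-- what changed: Instead of A's double pass (isColourFlush builds a sorted set and counts each distinct colour with hand.count, then best_colour_flush repeats that whole computation), B sorts the colour list once and does one linear run-length scan over it, overwriting the result whenever a run exceeds 4, so the last (alphabetically greatest) qualifying colour wins; Pre_ excludes hands containing an empty string, on which both raise IndexError.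
import Mathlib
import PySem

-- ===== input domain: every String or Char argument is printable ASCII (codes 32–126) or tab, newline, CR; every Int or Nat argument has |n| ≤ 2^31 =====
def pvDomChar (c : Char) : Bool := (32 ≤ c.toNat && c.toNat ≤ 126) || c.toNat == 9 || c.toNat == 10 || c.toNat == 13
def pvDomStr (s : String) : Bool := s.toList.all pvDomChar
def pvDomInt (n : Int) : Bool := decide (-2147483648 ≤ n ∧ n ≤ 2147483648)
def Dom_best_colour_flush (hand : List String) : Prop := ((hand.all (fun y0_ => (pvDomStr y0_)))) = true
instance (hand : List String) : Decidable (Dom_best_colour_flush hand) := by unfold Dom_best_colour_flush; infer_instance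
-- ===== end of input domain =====

-- B replaces A's repeated sorted-set + hand.count passes by one sort of the colour list and a
-- single run-length scan (faster); Pre_ excludes hands containing an empty card string, on which
-- the Python (both A and B) raises IndexError at card[0].

-- ===== PORT A =====
-- card[0] as a one-character string; none (IndexError, empty string) is excluded by Pre_, "" is a placeholder
def pvFirst (s : String) : String :=
  match PySem.Str.pyGet? s 0 with
  | some c => String.ofList [c]
  | none => ""

def isColourFlush (hand : List String) : Bool :=
  let hand2 := hand.map pvFirst
  let setHand := PySem.List.sorted (PySem.Set.ofList hand2) (fun x => x) false
  let myTuple : List (String × Int) :=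
    setHand.foldl (fun acc i => acc ++ [(i, (PySem.List.count hand2 i : Int))]) []
  myTuple.foldl (fun b x => if x.2 > 4 then true else b) false

def best_colour_flush (hand : List String) : Option (String × Int) :=
  if isColourFlush hand then
    let hand2 := hand.map pvFirst
    let setHand := PySem.List.sorted (PySem.Set.ofList hand2) (fun x => x) false
    let myTuple : List (String × Int) :=
      setHand.foldl (fun acc i => acc ++ [(i, (PySem.List.count hand2 i : Int))]) []
    myTuple.foldl (fun b x => if x.2 > 4 then some x else b) (none : Option (String × Int))
  else none

-- ===== PORT B =====
-- one run of equal colours per step: run = the bloc of colours equal to the head, as in Source B's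
-- inner `while colours[j] == colours[i]` scan; the recursion advances i to j (drops the run)
def bcfScan : List String → Option (String × Int) → Option (String × Int)
  | [], best => best
  | c :: rest, best =>
    let run := rest.takeWhile (fun d => d == c)
    let len : Int := 1 + (run.length : Int)
    bcfScan (rest.dropWhile (fun d => d == c)) (if len > 4 then some (c, len) else best)
termination_by l _ => l.length
decreasing_by
  exact Nat.lt_succ_of_le (List.Sublist.length_le (List.dropWhile_sublist _))

def best_colour_flush_alt (hand : List String) : Option (String × Int) :=
  bcfScan (PySem.List.sorted (hand.map pvFirst) (fun x => x) false) none

-- ===== PRECONDITION & SPEC =====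
-- Pre_ excludes hands containing an empty string: there card[0] raises IndexError in Python (A and B alike)
def Pre_best_colour_flush (hand : List String) : Prop := ∀ s ∈ hand, s ≠ ""
instance (hand : List String) : Decidable (Pre_best_colour_flush hand) := by
  unfold Pre_best_colour_flush; infer_instance
def pvWitness_best_colour_flush : List String := ["H2", "H3", "H4", "H5", "H6"]

def Spec_best_colour_flush (hand : List String) (out : Option (String × Int)) : Prop := out = best_colour_flush_alt hand
instance (hand : List String) (out : Option (String × Int)) : Decidable (Spec_best_colour_flush hand out) := by unfold Spec_best_colour_flush; infer_instance

-- ===== CLAIM (what is proved, stated in full; the proofs are below) =====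
def Claim_equal_best_colour_flush : Prop := ∀ (hand : List String), Dom_best_colour_flush hand → Pre_best_colour_flush hand → Spec_best_colour_flush hand (best_colour_flush hand)

-- ===== LEMMAS AND PROOFS =====

-- the common shape of both results: the "take the last colour whose count exceeds 4" fold
def bcfFold (L : List String) (cnt : String → Int) (b : Option (String × Int)) : Option (String × Int) :=
  L.foldl (fun b c => if (4:Int) < cnt c then some (c, cnt c) else b) b

theorem bcf_foldl_add_exists (l : List String) :
    ∀ s : List String, ∃ t, List.foldl PySem.Set.add s l = s ++ t ∧ t.Sublist l := by
  induction l with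
  | nil => exact fun s => ⟨[], by simp⟩
  | cons x l ih =>
    intro s
    by_cases hx : PySem.Set.contains s x = true
    · obtain ⟨t, ht, hs⟩ := ih s
      refine ⟨t, ?_, hs.cons x⟩
      rw [List.foldl_cons]
      have hadd : PySem.Set.add s x = s := by rw [PySem.Set.add, if_pos hx]
      rw [hadd]; exact ht
    · obtain ⟨t, ht, hs⟩ := ih (s ++ [x])
      refine ⟨x :: t, ?_, hs.cons₂ x⟩
      rw [List.foldl_cons]
      have hadd : PySem.Set.add s x = s ++ [x] := by rw [PySem.Set.add, if_neg hx]
      rw [hadd, ht, List.append_assoc]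
      rfl

theorem bcf_ofList_sublist (l : List String) : (PySem.Set.ofList l).Sublist l := by
  obtain ⟨t, ht, hs⟩ := bcf_foldl_add_exists l []
  rw [PySem.Set.ofList_eq_foldl, ht]; simpa using hs

theorem bcf_foldl_add_const (t : List String) :
    ∀ s : List String, (∀ x ∈ t, x ∈ s) → List.foldl PySem.Set.add s t = s := by
  induction t with
  | nil => simp
  | cons x t ih =>
    intro s h
    have hx : PySem.Set.contains s x = true := by simpa [PySem.Set.contains] using h x (by simp)
    rw [List.foldl_cons]
    have hadd : PySem.Set.add s x = s := by rw [PySem.Set.add, if_pos hx]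
    rw [hadd]
    exact ih s (fun y hy => h y (by simp [hy]))

theorem bcf_foldl_add_cons_notmem (d : List String) :
    ∀ (s : List String) (c : String), c ∉ d →
      List.foldl PySem.Set.add (c :: s) d = c :: List.foldl PySem.Set.add s d := by
  induction d with
  | nil => simp
  | cons y d ih =>
    intro s c hc
    have hyc : y ≠ c := fun h => hc (by simp [h])
    have h1 : PySem.Set.contains (c :: s) y = PySem.Set.contains s y := by
      simp [PySem.Set.contains, hyc]
    rw [List.foldl_cons, List.foldl_cons]
    by_cases hy : PySem.Set.contains s y = true
    · have ha : PySem.Set.add (c :: s) y = c :: s := by rw [PySem.Set.add, if_pos (h1 ▸ hy)]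
      have hb : PySem.Set.add s y = s := by rw [PySem.Set.add, if_pos hy]
      rw [ha, hb]
      exact ih s c (fun h => hc (by simp [h]))
    · have ha : PySem.Set.add (c :: s) y = c :: (s ++ [y]) := by
        rw [PySem.Set.add, if_neg (h1 ▸ hy)]; rfl
      have hb : PySem.Set.add s y = s ++ [y] := by rw [PySem.Set.add, if_neg hy]
      rw [ha, hb]
      exact ih (s ++ [y]) c (fun h => hc (by simp [h]))

theorem bcf_ofList_run (c : String) (t d : List String)
    (ht : ∀ x ∈ t, x = c) (hd : c ∉ d) :
    PySem.Set.ofList (c :: (t ++ d)) = c :: PySem.Set.ofList d := by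
  rw [PySem.Set.ofList_eq_foldl, PySem.Set.ofList_eq_foldl, List.foldl_cons]
  have hadd : PySem.Set.add ([] : List String) c = [c] := by
    rw [PySem.Set.add, if_neg (by simp [PySem.Set.contains])]; rfl
  rw [hadd, List.foldl_append]
  have h1 : List.foldl PySem.Set.add [c] t = [c] :=
    bcf_foldl_add_const t [c] (fun x hx => by simp [ht x hx])
  rw [h1]
  exact bcf_foldl_add_cons_notmem d [] c hd

theorem bcf_dropWhile_not_mem (c : String) (rest : List String)
    (hpc : ∀ x ∈ rest, c ≤ x) (hp : rest.Pairwise (· ≤ ·)) :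
    c ∉ rest.dropWhile (fun d => d == c) := by
  induction rest with
  | nil => simp
  | cons y r ih =>
    by_cases hy : (y == c) = true
    · rw [List.dropWhile_cons, if_pos hy]
      exact ih (fun x hx => hpc x (List.mem_cons_of_mem y hx)) (List.pairwise_cons.mp hp).2
    · rw [List.dropWhile_cons, if_neg hy]
      intro hmem
      have hyc : y ≠ c := fun h => hy (by simp [h])
      rcases List.mem_cons.mp hmem with h | h
      · exact hyc h.symm
      · have h1 : y ≤ c := (List.pairwise_cons.mp hp).1 c h
        have h2 : c ≤ y := hpc y (by simp)
        exact hyc (le_antisymm h1 h2)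

theorem bcf_run (n : Nat) : ∀ (l : List String), l.length ≤ n → l.Pairwise (· ≤ ·) →
    ∀ b, bcfScan l b = bcfFold (PySem.Set.ofList l) (fun c => ((l.count c : Int))) b := by
  induction n with
  | zero =>
    intro l hl _ b
    have : l = [] := List.eq_nil_of_length_eq_zero (Nat.le_zero.mp hl)
    subst this
    simp [bcfScan, bcfFold, PySem.Set.ofList]
  | succ n ih =>
    intro l hl hp b
    match l with
    | [] => simp [bcfScan, bcfFold, PySem.Set.ofList]
    | c :: rest =>
      have hpc : ∀ x ∈ rest, c ≤ x := (List.pairwise_cons.mp hp).1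
      have hpr : rest.Pairwise (· ≤ ·) := (List.pairwise_cons.mp hp).2
      set t := rest.takeWhile (fun d => d == c) with htdef
      set d := rest.dropWhile (fun d => d == c) with hddef
      have htd : t ++ d = rest := List.takeWhile_append_dropWhile
      have ht : ∀ x ∈ t, x = c := by
        intro x hx
        rw [htdef] at hx
        have hp' := List.mem_takeWhile_imp (p := fun d => d == c) (l := rest) (x := x) hx
        exact eq_of_beq hp'
      have hdp : d.Pairwise (· ≤ ·) := hpr.sublist (List.dropWhile_sublist _)
      have hcd : c ∉ d := hddef ▸ bcf_dropWhile_not_mem c rest hpc hpr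
      have hxt : ∀ x ∈ d, x ∉ t := by
        intro x hx hmemt
        exact hcd ((ht x hmemt) ▸ hx)
      have hcount : (c :: rest).count c = 1 + t.length := by
        rw [← htd, List.count_cons_self, List.count_append]
        have h1 : t.count c = t.length := List.count_eq_length.mpr (fun x hx => (ht x hx).symm)
        have h2 : d.count c = 0 := List.count_eq_zero.mpr hcd
        omega
      have hcx : ∀ x ∈ d, (c :: rest).count x = d.count x := by
        intro x hx
        have hxc : (c == x) = false := by
          simp only [beq_eq_false_iff_ne]
          exact fun h => hcd (h ▸ hx)
        rw [← htd, List.count_cons, List.count_append, hxc]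
        have h1 : t.count x = 0 := List.count_eq_zero.mpr (hxt x hx)
        simp only [Bool.false_eq_true, if_false]
        omega
      have hscan : bcfScan (c :: rest) b =
          bcfScan d (if (4:Int) < 1 + (t.length : Int) then some (c, 1 + (t.length : Int)) else b) := by
        rw [bcfScan]
      rw [hscan]
      have hset : PySem.Set.ofList (c :: rest) = c :: PySem.Set.ofList d := by
        rw [← htd]; exact bcf_ofList_run c t d ht hcd
      have hcc : (((c :: rest).count c : Int)) = 1 + (t.length : Int) := by
        rw [hcount]; push_cast; ring
      have hrhs : bcfFold (PySem.Set.ofList (c :: rest)) (fun x => (((c :: rest).count x : Int))) b =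
          bcfFold (PySem.Set.ofList d) (fun x => ((d.count x : Int)))
            (if (4:Int) < 1 + (t.length : Int) then some (c, 1 + (t.length : Int)) else b) := by
        rw [hset]
        unfold bcfFold
        rw [List.foldl_cons]
        simp only [hcc]
        exact PySem.List.foldl_congr_mem _ _ _ _
          (fun acc x hx => by
            have hq := hcx x ((PySem.Set.mem_ofList d x).mp hx)
            simp only [hq])
      rw [hrhs]
      have hdlen : d.length ≤ n := by
        have h1 : d.length ≤ rest.length := (List.dropWhile_sublist _).length_le
        have h2 : rest.length + 1 ≤ n + 1 := by simpa using hl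
        omega
      exact ih d hdlen hdp _

theorem bcf_foldl_or (l : List (String × Int)) : ∀ b : Bool,
    l.foldl (fun b x => if x.2 > 4 then true else b) b = (b || l.any (fun x => decide ((4:Int) < x.2))) := by
  induction l with
  | nil => simp
  | cons x l ih =>
    intro b
    rw [List.foldl_cons, ih]
    by_cases h : (4:Int) < x.2 <;> simp [h]

theorem bcf_fold_none (L : List String) (cnt : String → Int) :
    ∀ b, (∀ c ∈ L, ¬ (4:Int) < cnt c) → bcfFold L cnt b = b := by
  induction L with
  | nil => intro b _; rfl
  | cons c L ih =>
    intro b h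
    unfold bcfFold
    rw [List.foldl_cons, if_neg (h c (by simp))]
    exact ih b (fun x hx => h x (by simp [hx]))

-- B's result equals the "last count > 4 over the sorted distinct colours" fold
theorem bcf_alt_eq (hand : List String) :
    best_colour_flush_alt hand =
      bcfFold (PySem.List.sorted (PySem.Set.ofList (hand.map pvFirst)) (fun x => x) false)
        (fun c => (((hand.map pvFirst).count c : Int))) none := by
  set cs := hand.map pvFirst with hcs
  set sc := PySem.List.sorted cs (fun x => x) false with hsc
  have hpair : sc.Pairwise (· ≤ ·) := PySem.List.sorted_pairwise cs (fun x => x)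
  have h1 : best_colour_flush_alt hand = bcfFold (PySem.Set.ofList sc) (fun c => ((sc.count c : Int))) none := by
    unfold best_colour_flush_alt
    exact bcf_run sc.length sc (le_refl _) hpair none
  have hperm : (PySem.Set.ofList sc).Perm (PySem.Set.ofList cs) := by
    rw [List.perm_ext_iff_of_nodup (PySem.Set.nodup_ofList sc) (PySem.Set.nodup_ofList cs)]
    intro a
    rw [PySem.Set.mem_ofList, PySem.Set.mem_ofList, hsc, PySem.List.mem_sorted]
  have hlt : (PySem.Set.ofList sc).Pairwise (· < ·) := by
    have hle : (PySem.Set.ofList sc).Pairwise (· ≤ ·) := hpair.sublist (bcf_ofList_sublist sc)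
    have hne : (PySem.Set.ofList sc).Pairwise (· ≠ ·) := PySem.Set.nodup_ofList sc
    exact (hle.and hne).imp (fun h => lt_of_le_of_ne h.1 h.2)
  have hset : PySem.List.sorted (PySem.Set.ofList cs) (fun x => x) false = PySem.Set.ofList sc :=
    PySem.List.sorted_eq_of_perm_of_pairwise_lt _ _ _ hperm hlt
  rw [h1, hset]
  unfold bcfFold
  exact PySem.List.foldl_congr_mem _ _ _ _
    (fun acc x _ => by
      have hq := (PySem.List.sorted_perm cs (fun x => x) false).count_eq x
      simp only [← hsc] at hq
      simp only [hq])

theorem bcf_A_eq (hand : List String) :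
    best_colour_flush hand =
      (if (PySem.List.sorted (PySem.Set.ofList (hand.map pvFirst)) (fun x => x) false).any
            (fun i => decide ((4:Int) < (((hand.map pvFirst).count i : Int)))) then
        bcfFold (PySem.List.sorted (PySem.Set.ofList (hand.map pvFirst)) (fun x => x) false)
          (fun c => (((hand.map pvFirst).count c : Int))) none
      else none) := by
  set cs := hand.map pvFirst with hcs
  set D := PySem.List.sorted (PySem.Set.ofList cs) (fun x => x) false with hD
  have hmt : D.foldl (fun acc i => acc ++ [(i, (PySem.List.count cs i : Int))]) ([] : List (String × Int)) =
      D.map (fun i => (i, ((cs.count i : Int)))) := by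
    simp only [PySem.List.count_eq]
    rw [PySem.List.foldl_append_singleton_eq_map (fun i => (i, ((List.count i cs : Int)))) D []]
    rfl
  have hflush : isColourFlush hand = D.any (fun i => decide ((4:Int) < ((cs.count i : Int)))) := by
    unfold isColourFlush
    simp only [← hcs, ← hD, hmt, bcf_foldl_or, Bool.false_or, List.any_map]
    rfl
  unfold best_colour_flush
  simp only [← hcs, ← hD, hmt, hflush]
  cases hb : D.any (fun i => decide ((4:Int) < ((cs.count i : Int)))) with
  | false => simp
  | true =>
    simp only [if_true]
    rw [List.foldl_map]
    rfl

-- ===== VERDICT (by name: the statement is the Claim_ definition above) =====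
theorem best_colour_flush_spec : Claim_equal_best_colour_flush := by
  intro hand _ _
  unfold Spec_best_colour_flush
  rw [bcf_A_eq, bcf_alt_eq]
  set D := PySem.List.sorted (PySem.Set.ofList (hand.map pvFirst)) (fun x => x) false with hD
  set cnt : String → Int := fun c => (((hand.map pvFirst).count c : Int)) with hcnt
  cases hb : D.any (fun i => decide ((4:Int) < cnt i)) with
  | true => simp
  | false =>
    simp only [Bool.false_eq_true, if_false]
    symm
    apply bcf_fold_none
    intro c hc hlt
    have : D.any (fun i => decide ((4:Int) < cnt i)) = true :=
      List.any_eq_true.mpr ⟨c, hc, by simpa using hlt⟩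
    rw [hb] at this
    exact absurd this (by simp)
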